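-- pv_equiv track=rewrite | github.com/keltin13/Salvation | Enemy.py | dualSort
-- ===== SOURCE A (Python) =====
-- def dualSort(L, values):
--     assert(len(L) == len(values))
--     d = dict()
--     for i in range(len(L)):
--         d[L[i]] = values[i]
--     sortedValues = sorted(list(d.values()), reverse=True)
--     sortedKeys = []
--     for val in sortedValues:
--         for key in d:
--             if d[key] == val:
--                 sortedKeys.append(key)
--                 del d[key]
--                 break
--     return sortedKeys
-- ===== SOURCE B (Python) =====
-- def dualSort(L, values):
--     assert(len(L) == len(values))
--     d = dict()
--     for k, v in zip(L, values):
--         d[k] = v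
--     groups = {}
--     for k in d:
--         groups.setdefault(d[k], []).append(k)
--     out = []
--     for v in sorted(groups, reverse=True):
--         out.extend(groups[v])
--     return out
-- ===== Notes on version B (the rewrite author's own statement) =====
-- stated objective: faster
-- what changed: Replaces A's rescan-the-whole-dict-for-each-sorted-value loop (with deletion) by a value->keys bucket table built in one pass over the dict plus a single sweep over the sorted distinct values.
import Mathlib
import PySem

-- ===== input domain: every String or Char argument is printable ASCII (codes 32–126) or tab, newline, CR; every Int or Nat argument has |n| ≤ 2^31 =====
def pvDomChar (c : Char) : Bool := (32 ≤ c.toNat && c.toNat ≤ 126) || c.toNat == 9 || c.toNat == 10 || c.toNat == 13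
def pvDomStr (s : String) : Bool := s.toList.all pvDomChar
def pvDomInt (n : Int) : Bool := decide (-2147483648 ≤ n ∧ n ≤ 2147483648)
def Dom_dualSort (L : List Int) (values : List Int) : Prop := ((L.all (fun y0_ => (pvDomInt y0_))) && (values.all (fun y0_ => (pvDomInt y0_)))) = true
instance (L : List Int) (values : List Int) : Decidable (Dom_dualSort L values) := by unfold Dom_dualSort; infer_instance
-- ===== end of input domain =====

-- B replaces A's sort-then-rescan-the-dict-per-value loop by a value→keys bucket table built in
-- one pass plus a single sorted sweep over the distinct values (same return value, proved below).

-- ===== PORT A =====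
-- loop body of A's 'for val in sortedValues: for key in d: if d[key] == val: append/del/break'
def dualSortStep (st : PySem.Dict Int Int × List Int) (val : Int) :
    PySem.Dict Int Int × List Int :=
  match st.1.keys.find? (fun key => st.1.getD key 0 == val) with
  | some key => (st.1.erase key, st.2 ++ [key])
  | none => st

def dualSort (L : List Int) (values : List Int) : List Int :=
  let d := (PySem.List.pyRange 0 (PySem.List.len L) 1).foldl
      (fun d i => d.insert (PySem.List.pyGetD L i 0) (PySem.List.pyGetD values i 0))
      PySem.Dict.empty
  let sortedValues := PySem.List.sorted d.values (fun x => x) true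
  (sortedValues.foldl dualSortStep (d, ([] : List Int))).2

-- ===== PORT B =====
def dualSort_alt (L : List Int) (values : List Int) : List Int :=
  let d := (L.zip values).foldl (fun d kv => d.insert kv.1 kv.2) PySem.Dict.empty
  let groups := d.items.foldl
      (fun g kv => g.modify kv.2 [] (fun b => b ++ [kv.1]))
      (PySem.Dict.empty : PySem.Dict Int (List Int))
  (PySem.List.sorted groups.keys (fun x => x) true).foldl
      (fun out v => out ++ groups.getD v []) []

-- ===== PRECONDITION & SPEC =====
-- Pre_ excludes exactly the inputs where A's assert fails (AssertionError): unequal lengths.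
def Pre_dualSort (L : List Int) (values : List Int) : Prop := L.length = values.length
instance (L : List Int) (values : List Int) : Decidable (Pre_dualSort L values) := by
  unfold Pre_dualSort; infer_instance
def pvWitness_dualSort : List Int × List Int := ([1, 2, 3], [5, 4, 5])

def Spec_dualSort (L : List Int) (values : List Int) (out : List Int) : Prop :=
  out = dualSort_alt L values
instance (L : List Int) (values : List Int) (out : List Int) : Decidable (Spec_dualSort L values out) := by
  unfold Spec_dualSort; infer_instance

-- ===== CLAIM (what is proved, stated in full; the proofs are below) =====
def Claim_equal_dualSort : Prop := ∀ (L : List Int) (values : List Int),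
  Dom_dualSort L values → Pre_dualSort L values → Spec_dualSort L values (dualSort L values)

-- ===== LEMMAS AND PROOFS =====

-- the keys of the items with value v, in insertion order
def pvBucket (items : List (Int × Int)) (v : Int) : List Int :=
  (items.filter (fun p => p.2 == v)).map Prod.fst

-- canonical result: distinct values in descending order, each expanded to its bucket
def pvSpecOf (items : List (Int × Int)) : List Int :=
  (PySem.List.sorted (PySem.List.dedup (items.map Prod.snd)) (fun x => x) true).flatMap
    (pvBucket items)

-- Dict internals are transparent
lemma pvValuesEq (d : PySem.Dict Int Int) : d.values = d.items.map Prod.snd := by cases d; rfl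
lemma pvKeysEq (d : PySem.Dict Int Int) : d.keys = d.items.map Prod.fst := by cases d; rfl

lemma pvFindCongr {l : List Int} {p q : Int → Bool} (h : ∀ a ∈ l, p a = q a) :
    l.find? p = l.find? q := by
  induction l with
  | nil => rfl
  | cons x xs ih =>
    rw [List.find?_cons, List.find?_cons, h x (List.mem_cons_self)]
    cases hq : q x with
    | true => rfl
    | false => exact ih fun a ha => h a (List.mem_cons_of_mem x ha)

-- A's inner scan is "first key whose stored value is v"
lemma pvFindKey (items : List (Int × Int)) (v : Int)
    (hnd : (items.map Prod.fst).Nodup) :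
    (PySem.Dict.mk items).keys.find? (fun k => (PySem.Dict.mk items).getD k 0 == v)
      = (items.find? (fun p => p.2 == v)).map Prod.fst := by
  induction items with
  | nil => rfl
  | cons hd rest ih =>
    obtain ⟨k0, v0⟩ := hd
    rw [List.map_cons] at hnd
    have hk0 : k0 ∉ rest.map Prod.fst := (List.nodup_cons.mp hnd).1
    have hnd' : (rest.map Prod.fst).Nodup := (List.nodup_cons.mp hnd).2
    have hkeys : (PySem.Dict.mk ((k0, v0) :: rest)).keys = k0 :: rest.map Prod.fst := rfl
    rw [hkeys, List.find?_cons, List.find?_cons]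
    have hget0 : (PySem.Dict.mk ((k0, v0) :: rest)).getD k0 0 = v0 := by
      simp [PySem.Dict.getD_eq_get?_getD, PySem.Dict.get?_mk_cons]
    rw [hget0]
    cases hv : (v0 == v) with
    | true => rfl
    | false =>
      have hcong : ∀ k ∈ rest.map Prod.fst,
          ((PySem.Dict.mk ((k0, v0) :: rest)).getD k 0 == v)
            = ((PySem.Dict.mk rest).getD k 0 == v) := by
        intro k hk
        have hne : ¬ (k0 == k) = true := by
          intro h
          exact hk0 (beq_iff_eq.mp h ▸ hk)
        simp [PySem.Dict.getD_eq_get?_getD, PySem.Dict.get?_mk_cons, hne]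
      rw [pvFindCongr hcong]
      have := ih hnd'
      rw [pvKeysEq] at this  -- keys (mk rest) = rest.map fst is definitional
      exact this

-- one full run of equal values v extracts exactly the v-bucket
lemma pvRun (v : Int) (n : Nat) :
    ∀ (items : List (Int × Int)) (acc : List Int),
    (items.map Prod.fst).Nodup → (items.map Prod.snd).count v = n →
    (List.replicate n v).foldl dualSortStep (PySem.Dict.mk items, acc)
      = (PySem.Dict.mk (items.filter (fun p => !(p.2 == v))), acc ++ pvBucket items v) := by
  induction n with
  | zero =>
    intro items acc hnd hcnt
    have hnot : v ∉ items.map Prod.snd := List.count_eq_zero.mp hcnt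
    have hall : ∀ p ∈ items, (!(p.2 == v)) = true := by
      intro p hp
      simp only [Bool.not_eq_true', beq_eq_false_iff_ne]
      intro h
      exact hnot (h ▸ List.mem_map_of_mem hp)
    rw [List.replicate_zero, List.foldl_nil, List.filter_eq_self.mpr hall]
    have hbueq : pvBucket items v = [] := by
      unfold pvBucket
      rw [List.filter_eq_nil_iff.mpr (fun p hp => by simpa using hall p hp)]
      rfl
    rw [hbueq, List.append_nil]
  | succ n ih =>
    intro items acc hnd hcnt
    have hmem : v ∈ items.map Prod.snd := by
      apply List.count_pos_iff.mp; omega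
    obtain ⟨p0, hp0mem, hfind⟩ : ∃ p0, p0 ∈ items ∧
        items.find? (fun p => p.2 == v) = some p0 := by
      obtain ⟨q, hq, hqv⟩ := List.mem_map.mp hmem
      have : (items.find? (fun p => p.2 == v)).isSome := by
        rw [List.find?_isSome]
        exact ⟨q, hq, by simpa using hqv⟩
      obtain ⟨p0, hp0⟩ := Option.isSome_iff_exists.mp this
      exact ⟨p0, List.mem_of_find?_eq_some hp0, hp0⟩
    obtain ⟨hp0v, as, bs, heq, has⟩ := List.find?_eq_some_iff_append.mp hfind
    have hp0v' : p0.2 = v := beq_iff_eq.mp hp0v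
    subst heq
    -- the step extracts p0
    have hstep : dualSortStep (PySem.Dict.mk (as ++ p0 :: bs), acc) v
        = (PySem.Dict.mk ((as ++ p0 :: bs).filter (fun p => p.1 != p0.1)), acc ++ [p0.1]) := by
      unfold dualSortStep
      rw [pvFindKey _ _ hnd, hfind]
      rfl
    -- key-distinctness facts
    rw [List.map_append, List.map_cons, List.nodup_middle] at hnd
    have hknotin : p0.1 ∉ as.map Prod.fst ++ bs.map Prod.fst := (List.nodup_cons.mp hnd).1
    have hnd' : ((as ++ bs).map Prod.fst).Nodup := by
      rw [List.map_append]; exact (List.nodup_cons.mp hnd).2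
    have hasne : ∀ p ∈ as, (p.1 != p0.1) = true := by
      intro p hp
      simp only [bne_iff_ne, ne_eq]
      intro h
      exact hknotin (List.mem_append_left _ (h ▸ List.mem_map_of_mem hp))
    have hbsne : ∀ p ∈ bs, (p.1 != p0.1) = true := by
      intro p hp
      simp only [bne_iff_ne, ne_eq]
      intro h
      exact hknotin (List.mem_append_right _ (h ▸ List.mem_map_of_mem hp))
    have hfilt : (as ++ p0 :: bs).filter (fun p => p.1 != p0.1) = as ++ bs := by
      rw [List.filter_append, List.filter_cons]
      rw [List.filter_eq_self.mpr hasne, List.filter_eq_self.mpr hbsne]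
      simp
    have hasnov : ∀ p ∈ as, (p.2 == v) = false := by
      intro p hp
      have := has p hp
      simpa using this
    have hcnt' : ((as ++ bs).map Prod.snd).count v = n := by
      rw [List.map_append, List.count_append]
      rw [List.map_append, List.map_cons, List.count_append, List.count_cons] at hcnt
      simp only [hp0v', beq_self_eq_true, if_pos] at hcnt
      omega
    have hbuck : pvBucket (as ++ p0 :: bs) v = p0.1 :: pvBucket (as ++ bs) v := by
      unfold pvBucket
      rw [List.filter_append, List.filter_cons, List.filter_append]
      rw [List.filter_eq_nil_iff.mpr (fun p hp => by simpa using hasnov p hp)]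
      simp [hp0v']
    have hfiltv : (as ++ p0 :: bs).filter (fun p => !(p.2 == v))
        = (as ++ bs).filter (fun p => !(p.2 == v)) := by
      rw [List.filter_append, List.filter_cons, List.filter_append]
      simp [hp0v']
    rw [List.replicate_succ, List.foldl_cons, hstep, hfilt, ih (as ++ bs) (acc ++ [p0.1]) hnd' hcnt',
      hbuck, hfiltv]
    simp

-- a descending sort starts with the run of its maximum
lemma pvSortedRun (vals : List Int) (v : Int) (_hv : v ∈ vals) (hmax : ∀ y ∈ vals, y ≤ v) :
    PySem.List.sorted vals (fun x => x) true
      = List.replicate (vals.count v) v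
        ++ PySem.List.sorted (vals.filter (fun x => !(x == v))) (fun x => x) true := by
  have hinj : Function.Injective (fun x : Int => -x) := fun a b h => by simpa using h
  refine PySem.List.eq_of_perm_of_pairwise_le_of_injective (fun x : Int => -x) hinj ?_ ?_ ?_
  · -- both sides are permutations of vals
    refine (PySem.List.sorted_perm vals _ true).trans (List.Perm.symm ?_)
    have h1 : (List.replicate (vals.count v) v
          ++ PySem.List.sorted (vals.filter (fun x => !(x == v))) (fun x => x) true).Perm
        (List.replicate (vals.count v) v ++ vals.filter (fun x => !(x == v))) :=
      List.Perm.append_left _ (PySem.List.sorted_perm _ _ true)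
    have h2 : List.replicate (vals.count v) v ++ vals.filter (fun x => !(x == v))
        = vals.filter (fun x => x == v) ++ vals.filter (fun x => !(x == v)) := by
      rw [List.filter_beq]
    exact h1.trans (h2 ▸ List.filter_append_perm (fun x => x == v) vals)
  · exact (PySem.List.sorted_pairwise_rev vals (fun x => x)).imp (fun h => by simpa using h)
  · rw [List.pairwise_append]
    refine ⟨?_, ?_, ?_⟩
    · exact List.pairwise_replicate.mpr (Or.inr (le_refl _))
    · exact (PySem.List.sorted_pairwise_rev _ (fun x => x)).imp (fun h => by simpa using h)
    · intro a ha b hb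
      have hav : a = v := (List.eq_of_mem_replicate ha)
      have hbv : b ∈ vals.filter (fun x => !(x == v)) :=
        (PySem.List.sorted_perm (vals.filter (fun x => !(x == v))) (fun x : Int => x)
          true).mem_iff.mp hb
      have hb2 : b ≤ v := hmax b (List.mem_of_mem_filter hbv)
      simp only [neg_le_neg_iff]
      omega

lemma pvMapSndFilter (items : List (Int × Int)) (v : Int) :
    (items.filter (fun p => !(p.2 == v))).map Prod.snd
      = (items.map Prod.snd).filter (fun x => !(x == v)) := by
  induction items with
  | nil => rfl
  | cons hd tl ih =>
    by_cases h : (hd.2 == v) = true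
    · simp [h, ih]
    · simp only [Bool.not_eq_true] at h
      simp [h, ih]

-- peeling the maximum value off the canonical form
lemma pvSpecDecomp (items : List (Int × Int)) (v : Int)
    (hv : v ∈ items.map Prod.snd) (hmax : ∀ y ∈ items.map Prod.snd, y ≤ v) :
    pvSpecOf items
      = pvBucket items v ++ pvSpecOf (items.filter (fun p => !(p.2 == v))) := by
  have hmf : (items.filter (fun p => !(p.2 == v))).map Prod.snd
      = (items.map Prod.snd).filter (fun x => !(x == v)) := pvMapSndFilter items v
  have hndF : (PySem.List.dedup ((items.map Prod.snd).filter (fun x => !(x == v)))).Nodup :=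
    PySem.List.nodup_dedup _
  have hsortnd : (PySem.List.sorted
      (PySem.List.dedup ((items.map Prod.snd).filter (fun x => !(x == v)))) (fun x : Int => x)
      true).Nodup :=
    ((PySem.List.sorted_perm _ _ true).nodup_iff).mpr hndF
  have hvnot : v ∉ PySem.List.sorted
      (PySem.List.dedup ((items.map Prod.snd).filter (fun x => !(x == v)))) (fun x : Int => x)
      true := by
    intro hmem
    have := (PySem.List.sorted_perm _ _ true).mem_iff.mp hmem
    rw [PySem.List.mem_dedup] at this
    simp at this
  have hsorted : PySem.List.sorted (PySem.List.dedup (items.map Prod.snd)) (fun x : Int => x) true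
      = v :: PySem.List.sorted
          (PySem.List.dedup ((items.map Prod.snd).filter (fun x => !(x == v)))) (fun x : Int => x)
          true := by
    apply PySem.List.sorted_rev_eq_of_perm_of_pairwise_gt
    · -- permutation via equal membership of nodup lists
      apply (List.perm_ext_iff_of_nodup (List.nodup_cons.mpr ⟨hvnot, hsortnd⟩)
        (PySem.List.nodup_dedup _)).mpr
      intro x
      rw [List.mem_cons, (PySem.List.sorted_perm _ _ true).mem_iff, PySem.List.mem_dedup,
        PySem.List.mem_dedup, List.mem_filter]
      constructor
      · rintro (rfl | ⟨hx, _⟩)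
        · exact hv
        · exact hx
      · intro hx
        by_cases hxv : x = v
        · exact Or.inl hxv
        · exact Or.inr ⟨hx, by simpa using hxv⟩
    · rw [List.pairwise_cons]
      constructor
      · intro b hb
        have hbm := (PySem.List.sorted_perm _ _ true).mem_iff.mp hb
        rw [PySem.List.mem_dedup, List.mem_filter] at hbm
        have hble : b ≤ v := hmax b hbm.1
        have hbne : b ≠ v := by simpa using hbm.2
        exact lt_of_le_of_ne hble hbne
      · have hge := PySem.List.sorted_pairwise_rev
          (PySem.List.dedup ((items.map Prod.snd).filter (fun x => !(x == v)))) (fun x : Int => x)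
        exact (hge.and hsortnd).imp (fun h => lt_of_le_of_ne h.1 (Ne.symm h.2))
  have hbu : ∀ u ∈ PySem.List.sorted
      (PySem.List.dedup ((items.map Prod.snd).filter (fun x => !(x == v)))) (fun x : Int => x)
      true, pvBucket items u = pvBucket (items.filter (fun p => !(p.2 == v))) u := by
    intro u hu
    have hum := (PySem.List.sorted_perm _ _ true).mem_iff.mp hu
    rw [PySem.List.mem_dedup, List.mem_filter] at hum
    have hune : u ≠ v := by simpa using hum.2
    unfold pvBucket
    rw [List.filter_filter]
    congr 1
    apply List.filter_congr
    intro p _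
    by_cases hp : p.2 = u
    · simp [hp, hune]
    · simp [hp]
  unfold pvSpecOf
  rw [hsorted, List.flatMap_cons, hmf]
  congr 1
  exact List.flatMap_congr hbu

-- A's outer loop computes the canonical form
lemma pvALoop : ∀ (items : List (Int × Int)) (acc : List Int),
    (items.map Prod.fst).Nodup →
    ((PySem.List.sorted (items.map Prod.snd) (fun x => x) true).foldl dualSortStep
        (PySem.Dict.mk items, acc)).2
      = acc ++ pvSpecOf items := by
  suffices H : ∀ (n : Nat) (items : List (Int × Int)) (acc : List Int), items.length ≤ n →
      (items.map Prod.fst).Nodup →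
      ((PySem.List.sorted (items.map Prod.snd) (fun x => x) true).foldl dualSortStep
          (PySem.Dict.mk items, acc)).2 = acc ++ pvSpecOf items by
    intro items acc hnd
    exact H items.length items acc le_rfl hnd
  intro n
  induction n with
  | zero =>
    intro items acc hlen _hnd
    have : items = [] := List.length_eq_zero_iff.mp (Nat.le_zero.mp hlen)
    subst this
    rw [show pvSpecOf [] = [] from rfl, List.append_nil]
    rfl
  | succ n ih =>
    intro items acc hlen hnd
    rcases hnil : items with _ | ⟨hd, tl⟩
    · rw [show pvSpecOf [] = [] from rfl, List.append_nil]
      rfl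
    rw [← hnil]
    have hvne : items.map Prod.snd ≠ [] := by rw [hnil]; simp
    obtain ⟨v, t, hst⟩ : ∃ v t,
        PySem.List.sorted (items.map Prod.snd) (fun x : Int => x) true = v :: t := by
      rcases hs : PySem.List.sorted (items.map Prod.snd) (fun x : Int => x) true with _ | ⟨v, t⟩
      · exact absurd ((PySem.List.sorted_eq_nil_iff _ _ _).mp hs) hvne
      · exact ⟨v, t, rfl⟩
    have hv : v ∈ items.map Prod.snd :=
      (PySem.List.sorted_perm _ _ true).mem_iff.mp (hst ▸ List.mem_cons_self)
    have hmax : ∀ y ∈ items.map Prod.snd, y ≤ v :=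
      PySem.List.key_head_sorted_rev_ge (items.map Prod.snd) (fun x => x) hst
    rw [pvSortedRun (items.map Prod.snd) v hv hmax, List.foldl_append,
      pvRun v ((items.map Prod.snd).count v) items acc hnd rfl, ← pvMapSndFilter items v]
    have hndF : ((items.filter (fun p => !(p.2 == v))).map Prod.fst).Nodup :=
      ((List.filter_sublist (l := items)).map Prod.fst).nodup hnd
    have hlt : (items.filter (fun p => !(p.2 == v))).length < items.length := by
      apply List.length_filter_lt_length_iff_exists.mpr
      obtain ⟨q, hq, hqv⟩ := List.mem_map.mp hv
      exact ⟨q, hq, by simp [hqv]⟩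
    rw [ih (items.filter (fun p => !(p.2 == v))) (acc ++ pvBucket items v) (by omega) hndF,
      pvSpecDecomp items v hv hmax, List.append_assoc]

-- both programs build the same dict
lemma pvBuildEq (L values : List Int) (h : L.length = values.length) :
    (PySem.List.pyRange 0 (PySem.List.len L) 1).foldl
        (fun d i => d.insert (PySem.List.pyGetD L i 0) (PySem.List.pyGetD values i 0))
        PySem.Dict.empty
      = (L.zip values).foldl (fun d kv => d.insert kv.1 kv.2) PySem.Dict.empty := by
  have key : ∀ (L V : List Int) (d0 : PySem.Dict Int Int), L.length = V.length →
      (List.range L.length).foldl (fun d i => d.insert (L.getD i 0) (V.getD i 0)) d0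
        = (L.zip V).foldl (fun d kv => d.insert kv.1 kv.2) d0 := by
    intro L
    induction L with
    | nil => intro V d0 _; rfl
    | cons x xs ih =>
      intro V d0 h
      cases V with
      | nil => simp at h
      | cons y ys =>
        rw [List.length_cons, List.range_succ_eq_map, List.foldl_cons, List.foldl_map]
        simp only [List.getD_cons_zero, List.getD_cons_succ]
        rw [List.zip_cons_cons, List.foldl_cons]
        exact ih ys _ (by simpa using h)
  rw [PySem.List.len_eq, PySem.List.pyRange_zero_nat, List.foldl_map]
  simp only [PySem.List.pyGetD_natCast]
  exact key L values PySem.Dict.empty h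

-- B computes the canonical form of the dict's items
lemma pvBEq (d : PySem.Dict Int Int) :
    (PySem.List.sorted
        (d.items.foldl (fun g kv => g.modify kv.2 [] (fun b => b ++ [kv.1]))
          (PySem.Dict.empty : PySem.Dict Int (List Int))).keys (fun x => x) true).foldl
      (fun out v => out ++
        (d.items.foldl (fun g kv => g.modify kv.2 [] (fun b => b ++ [kv.1]))
          (PySem.Dict.empty : PySem.Dict Int (List Int))).getD v []) []
      = pvSpecOf d.items := by
  have hfold : d.items.foldl (fun g kv => g.modify kv.2 [] (fun b => b ++ [kv.1]))
        (PySem.Dict.empty : PySem.Dict Int (List Int))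
      = (d.items.map Prod.swap).foldl (fun g p => g.modify p.1 [] (fun b => b ++ [p.2]))
        (PySem.Dict.empty : PySem.Dict Int (List Int)) := by
    rw [List.foldl_map]
    rfl
  have hgetD : ∀ vv : Int,
      (d.items.foldl (fun g kv => g.modify kv.2 [] (fun b => b ++ [kv.1]))
        (PySem.Dict.empty : PySem.Dict Int (List Int))).getD vv []
      = pvBucket d.items vv := by
    intro vv
    rw [hfold, PySem.Dict.getD_foldl_modify_append]
    have hswap : (d.items.map Prod.swap).filter (fun p => p.1 == vv)
        = (d.items.filter (fun p => p.2 == vv)).map Prod.swap := by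
      rw [List.filter_map]
      rfl
    rw [hswap]
    simp [pvBucket, PySem.Dict.getD_empty, Prod.swap]
  have hkeys : (d.items.foldl (fun g kv => g.modify kv.2 [] (fun b => b ++ [kv.1]))
        (PySem.Dict.empty : PySem.Dict Int (List Int))).keys
      = PySem.List.dedup (d.items.map Prod.snd) := by
    have h := PySem.Dict.keys_foldl_modify_key d.items (fun kv : Int × Int => kv.2)
      ([] : List Int) (fun _ kv => fun b => b ++ [kv.1])
      (PySem.Dict.empty : PySem.Dict Int (List Int))
    rw [h]
    rfl
  rw [hkeys, PySem.List.foldl_append_eq_flatMap, List.nil_append]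
  unfold pvSpecOf
  exact List.flatMap_congr (fun v _ => hgetD v)

-- ===== VERDICT (by name: the statement is the Claim_ definition above) =====
theorem dualSort_spec : Claim_equal_dualSort := by
  intro L values _hdom hpre
  unfold Spec_dualSort dualSort dualSort_alt
  dsimp only
  rw [pvBuildEq L values hpre]
  set d := (L.zip values).foldl (fun d kv => d.insert kv.1 kv.2) PySem.Dict.empty with hd
  have hnd : (d.items.map Prod.fst).Nodup := by
    rw [← pvKeysEq]
    exact PySem.Dict.nodup_keys_foldl_insert_key (L.zip values) Prod.fst
      (fun _ kv => kv.2) PySem.Dict.empty (by simp [PySem.Dict.keys_empty])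
  have hmk : PySem.Dict.mk d.items = d := by cases d; rfl
  rw [pvBEq d, pvValuesEq d]
  have h := pvALoop d.items [] hnd
  rw [hmk] at h
  simpa using h
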